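-- pv_equiv track=rewrite | github.com/oscargus/timink | src/timink/ti_signalspec.py | _getShadingRanges
-- ===== SOURCE A (Python) =====
-- def _getShadingRanges(states):
--     """
--     Returns a list of pair-wise disjunct intervals of all indices i of states
--     with states[i][3] = True.
--
--     Returns:
--       [(start ,  end ), ..., start   , end    )]
--              0      0             n-1     n-1
--       For each interval j: states[i][3] = True for each i with start_j <= i < end_j.
--     """
--     shadedRanges = []
--     incomplStartIndex = None
--     for i in range(0, len(states)):
--         t, y, doShade = states[i]
--         if doShade:
--             if incomplStartIndex is None:
--                 incomplStartIndex = i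
--         else:
--             if incomplStartIndex is not None:
--                 shadedRanges.append((incomplStartIndex, i))
--                 incomplStartIndex = None
--     if incomplStartIndex is not None:
--         shadedRanges.append((incomplStartIndex, len(states)))
--     return shadedRanges
-- ===== SOURCE B (Python) =====
-- from itertools import groupby
--
--
-- def _getShadingRanges(states):
--     res = []
--     idx = 0
--     for key, grp in groupby(states, key=lambda s: (lambda t, y, d: bool(d))(*s)):
--         n = sum(1 for _ in grp)
--         if key:
--             res.append((idx, idx + n))
--         idx += n
--     return res
-- ===== Notes on version B (the rewrite author's own statement) =====
-- stated objective: idiomatic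
-- what changed: Replaces the open-start sentinel and falling-edge bookkeeping with itertools.groupby over the shading flag: each truthy run's length directly yields one (idx, idx+n) interval, so the final run closes without a post-loop fixup.
import Mathlib
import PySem

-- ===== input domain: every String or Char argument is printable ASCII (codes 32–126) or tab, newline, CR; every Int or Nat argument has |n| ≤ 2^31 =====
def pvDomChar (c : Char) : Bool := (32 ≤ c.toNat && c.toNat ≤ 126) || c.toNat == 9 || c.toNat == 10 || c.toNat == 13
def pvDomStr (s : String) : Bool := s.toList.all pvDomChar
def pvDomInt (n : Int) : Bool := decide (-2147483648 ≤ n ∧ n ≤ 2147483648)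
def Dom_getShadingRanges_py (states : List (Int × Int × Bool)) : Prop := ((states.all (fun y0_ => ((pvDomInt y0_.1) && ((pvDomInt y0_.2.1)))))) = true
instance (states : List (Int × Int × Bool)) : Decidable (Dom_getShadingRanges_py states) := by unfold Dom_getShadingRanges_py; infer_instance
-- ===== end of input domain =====

-- B replaces A's open-start sentinel / falling-edge logic with a run-grouping pass (groupby); same output, idiomatic decomposition.

-- ===== PORT A =====
-- the for-loop of A, carrying the loop state (shadedRanges, incomplStartIndex) and the index i
def getShadingRanges_aLoop (i : Int) (shadedRanges : List (Int × Int))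
    (incompl : Option Int) : List (Int × Int × Bool) → List (Int × Int) × Option Int
  | [] => (shadedRanges, incompl)
  | (_t, _y, doShade) :: rest =>
    if doShade then
      match incompl with
      | none => getShadingRanges_aLoop (i + 1) shadedRanges (some i) rest
      | some s => getShadingRanges_aLoop (i + 1) shadedRanges (some s) rest
    else
      match incompl with
      | some s => getShadingRanges_aLoop (i + 1) (shadedRanges ++ [(s, i)]) none rest
      | none => getShadingRanges_aLoop (i + 1) shadedRanges none rest

def getShadingRanges_py (states : List (Int × Int × Bool)) : List (Int × Int) :=
  match getShadingRanges_aLoop 0 [] none states with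
  | (shadedRanges, none) => shadedRanges
  | (shadedRanges, some s) => shadedRanges ++ [(s, (states.length : Int))]

-- ===== PORT B =====
-- groupby over the shading flag: take each maximal run of equal flag, emit (idx, idx+n) for shaded runs
def getShadingRanges_bGo (idx : Int) : List (Int × Int × Bool) → List (Int × Int)
  | [] => []
  | s :: rest =>
    let d := s.2.2
    let n : Int := 1 + ((rest.takeWhile (fun u => u.2.2 == d)).length : Int)
    let rest' := rest.dropWhile (fun u => u.2.2 == d)
    if d then (idx, idx + n) :: getShadingRanges_bGo (idx + n) rest'
    else getShadingRanges_bGo (idx + n) rest'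
termination_by l => l.length
decreasing_by
  all_goals
    simpa using Nat.lt_succ_of_le (List.length_dropWhile_le _ _)

def getShadingRanges_py_alt (states : List (Int × Int × Bool)) : List (Int × Int) :=
  getShadingRanges_bGo 0 states

-- ===== PRECONDITION & SPEC =====
def Spec_getShadingRanges_py (states : List (Int × Int × Bool)) (out : List (Int × Int)) : Prop := out = getShadingRanges_py_alt states
instance (states : List (Int × Int × Bool)) (out : List (Int × Int)) : Decidable (Spec_getShadingRanges_py states out) := by unfold Spec_getShadingRanges_py; infer_instance

-- ===== CLAIM (what is proved, stated in full; the proofs are below) =====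
def Claim_equal_getShadingRanges_py : Prop := ∀ (states : List (Int × Int × Bool)), Dom_getShadingRanges_py states → Spec_getShadingRanges_py states (getShadingRanges_py states)

-- ===== LEMMAS AND PROOFS =====

-- finalization of A's loop state at endpoint n (the post-loop 'if incomplStartIndex is not None' step)
def pvFin : List (Int × Int) × Option Int → Int → List (Int × Int)
  | (rs, none), _ => rs
  | (rs, some s), n => rs ++ [(s, n)]

-- a run of unshaded states produces nothing in B; skipping it one element at a time is the same
lemma bGo_false (rest : List (Int × Int × Bool)) (i t y : Int) :
    getShadingRanges_bGo i ((t, y, false) :: rest) = getShadingRanges_bGo (i + 1) rest := by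
  match rest with
  | [] => simp [getShadingRanges_bGo]
  | (t2, y2, d2) :: r2 =>
    cases d2 with
    | true => simp [getShadingRanges_bGo]
    | false =>
      simp only [getShadingRanges_bGo, List.takeWhile, List.dropWhile]
      norm_num
      ring_nf

lemma pvJoint (l : List (Int × Int × Bool)) :
    (∀ i rs, pvFin (getShadingRanges_aLoop i rs none l) (i + (l.length : Int))
      = rs ++ getShadingRanges_bGo i l)
    ∧ (∀ i rs s, pvFin (getShadingRanges_aLoop i rs (some s) l) (i + (l.length : Int))
      = rs ++ (s, i + ((l.takeWhile (fun u => u.2.2 == true)).length : Int))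
          :: getShadingRanges_bGo (i + ((l.takeWhile (fun u => u.2.2 == true)).length : Int))
              (l.dropWhile (fun u => u.2.2 == true))) := by
  induction l with
  | nil => constructor <;> intros <;> simp [getShadingRanges_aLoop, getShadingRanges_bGo, pvFin]
  | cons hd tl ih =>
    obtain ⟨t, y, d⟩ := hd
    constructor
    · intro i rs
      cases d with
      | true =>
        have h2 := ih.2 (i + 1) rs i
        simp only [getShadingRanges_aLoop, if_pos]
        simp only [getShadingRanges_bGo, List.length_cons]
        rw [show i + ((tl.length + 1 : Nat) : Int) = (i + 1) + (tl.length : Int) by push_cast; ring]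
        rw [h2]
        try simp only [List.takeWhile, List.dropWhile]
        norm_num
        ring_nf
        all_goals exact ⟨trivial, trivial⟩
      | false =>
        have h1 := ih.1 (i + 1) rs
        simp only [getShadingRanges_aLoop]
        simp only [List.length_cons]
        rw [show i + ((tl.length + 1 : Nat) : Int) = (i + 1) + (tl.length : Int) by push_cast; ring]
        simp only [Bool.false_eq_true, if_false]
        rw [h1, bGo_false]
    · intro i rs s
      cases d with
      | true =>
        have h2 := ih.2 (i + 1) rs s
        simp only [getShadingRanges_aLoop, if_pos]
        simp only [List.length_cons]
        rw [show i + ((tl.length + 1 : Nat) : Int) = (i + 1) + (tl.length : Int) by push_cast; ring]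
        rw [h2]
        try simp only [List.takeWhile, List.dropWhile]
        norm_num
        ring_nf
        all_goals exact ⟨trivial, trivial⟩
      | false =>
        have h1 := ih.1 (i + 1) (rs ++ [(s, i)])
        simp only [getShadingRanges_aLoop]
        simp only [List.length_cons]
        rw [show i + ((tl.length + 1 : Nat) : Int) = (i + 1) + (tl.length : Int) by push_cast; ring]
        simp only [Bool.false_eq_true, if_false]
        rw [h1]
        simp only [List.takeWhile, List.dropWhile]
        norm_num
        rw [bGo_false]

-- ===== VERDICT (by name: the statement is the Claim_ definition above) =====
theorem getShadingRanges_py_spec : Claim_equal_getShadingRanges_py := by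
  intro states _
  unfold Spec_getShadingRanges_py getShadingRanges_py getShadingRanges_py_alt
  have h := (pvJoint states).1 0 []
  simp only [zero_add, List.nil_append] at h
  rw [← h]
  cases hA : getShadingRanges_aLoop 0 [] none states with
  | mk rs inc => cases inc <;> simp [pvFin]
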